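-- pv_equiv track=rewrite | github.com/Grindin247/family-cloud | apps/family-event-service/app/services/vikunja_events.py | _task_candidate_score
-- ===== SOURCE A (Python) =====
-- from typing import Any
--
-- def _task_candidate_score(candidate: dict[str, Any], path: str) -> int:
--     score = 0
--     path_lower = path.lower()
--     if path_lower.endswith("task") or ".task." in f"{path_lower}.":
--         score += 100
--     for key in ("done", "project_id", "updated", "created", "due_date", "done_at", "bucket_id", "description", "identifier", "priority", "percent_done", "start_date", "end_date"):
--         if key in candidate:
--             score += 10
--     for key in ("assignees", "labels", "created_by", "related_tasks", "attachments", "position"):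
--         if key in candidate:
--             score += 4
--     if "hex_color" in candidate and "project_id" not in candidate:
--         score -= 10
--     return score
-- ===== SOURCE B (Python) =====
-- _WEIGHTS = {
--     "done": 10, "project_id": 10, "updated": 10, "created": 10, "due_date": 10,
--     "done_at": 10, "bucket_id": 10, "description": 10, "identifier": 10,
--     "priority": 10, "percent_done": 10, "start_date": 10, "end_date": 10,
--     "assignees": 4, "labels": 4, "created_by": 4, "related_tasks": 4,
--     "attachments": 4, "position": 4,
-- }
--
-- def _task_candidate_score(candidate, path):
--     path_lower = path.lower()
--     score = 100 if (path_lower.endswith("task") or ".task." in path_lower + ".") else 0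
--     score += sum(_WEIGHTS.get(key, 0) for key in candidate)
--     if "hex_color" in candidate and "project_id" not in candidate:
--         score -= 10
--     return score
-- ===== Notes on version B (the rewrite author's own statement) =====
-- stated objective: simpler
-- what changed: Replaces the two fixed-key scans with membership tests by a single pass over the candidate's own keys summing weights from one constant weight table.
import Mathlib
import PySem

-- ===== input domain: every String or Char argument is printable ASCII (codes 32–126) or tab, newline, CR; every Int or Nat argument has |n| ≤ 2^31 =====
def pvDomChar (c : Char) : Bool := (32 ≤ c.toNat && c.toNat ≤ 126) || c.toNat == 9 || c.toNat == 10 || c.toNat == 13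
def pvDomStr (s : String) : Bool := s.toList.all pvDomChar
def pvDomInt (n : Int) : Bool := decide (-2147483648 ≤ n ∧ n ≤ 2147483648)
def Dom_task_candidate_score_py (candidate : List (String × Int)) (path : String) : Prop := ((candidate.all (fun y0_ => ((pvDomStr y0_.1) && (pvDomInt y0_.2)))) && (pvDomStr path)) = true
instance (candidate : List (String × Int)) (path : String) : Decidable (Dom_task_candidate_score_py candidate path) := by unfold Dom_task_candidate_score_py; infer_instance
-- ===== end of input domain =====

-- B replaces A's two fixed-key scans over the candidate by one pass over the candidate's
-- own (distinct) keys summing weights from a single constant weight table; same result, simpler.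


-- ===== PORT A =====
-- the first fixed key tuple (scores 10 each)
def pvKeys10 : List String :=
  ["done", "project_id", "updated", "created", "due_date", "done_at", "bucket_id",
   "description", "identifier", "priority", "percent_done", "start_date", "end_date"]
-- the second fixed key tuple (scores 4 each)
def pvKeys4 : List String :=
  ["assignees", "labels", "created_by", "related_tasks", "attachments", "position"]

def task_candidate_score_py (candidate : List (String × Int)) (path : String) : Int :=
  let keys := candidate.map Prod.fst       -- 'key in candidate' on a dict tests its keys
  let score : Int := 0
  let path_lower := PySem.Str.lower path
  let score := if PySem.Str.endswith path_lower "task"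
                  || PySem.Str.isIn ".task." (path_lower ++ ".") then score + 100 else score
  let score := pvKeys10.foldl (fun s key => if keys.contains key then s + 10 else s) score
  let score := pvKeys4.foldl (fun s key => if keys.contains key then s + 4 else s) score
  if keys.contains "hex_color" && !(keys.contains "project_id") then score - 10 else score

-- ===== PORT B =====
-- the constant weight table _WEIGHTS
def pvWeights : PySem.Dict String Int := PySem.Dict.mk
  [("done", 10), ("project_id", 10), ("updated", 10), ("created", 10), ("due_date", 10),
   ("done_at", 10), ("bucket_id", 10), ("description", 10), ("identifier", 10),
   ("priority", 10), ("percent_done", 10), ("start_date", 10), ("end_date", 10),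
   ("assignees", 4), ("labels", 4), ("created_by", 4), ("related_tasks", 4),
   ("attachments", 4), ("position", 4)]

def task_candidate_score_py_alt (candidate : List (String × Int)) (path : String) : Int :=
  let keys := candidate.map Prod.fst
  let path_lower := PySem.Str.lower path
  let score : Int := if PySem.Str.endswith path_lower "task"
                        || PySem.Str.isIn ".task." (path_lower ++ ".") then 100 else 0
  -- 'for key in candidate' iterates the dict's distinct keys in insertion order
  let score := score + ((PySem.Set.ofList keys).map (fun k => pvWeights.getD k 0)).sum
  if keys.contains "hex_color" && !(keys.contains "project_id") then score - 10 else score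

-- ===== PRECONDITION & SPEC =====
def Spec_task_candidate_score_py (candidate : List (String × Int)) (path : String) (out : Int) : Prop := out = task_candidate_score_py_alt candidate path
instance (candidate : List (String × Int)) (path : String) (out : Int) : Decidable (Spec_task_candidate_score_py candidate path out) := by unfold Spec_task_candidate_score_py; infer_instance

-- ===== CLAIM (what is proved, stated in full; the proofs are below) =====
def Claim_equal_task_candidate_score_py : Prop := ∀ (candidate : List (String × Int)) (path : String), Dom_task_candidate_score_py candidate path → Spec_task_candidate_score_py candidate path (task_candidate_score_py candidate path)

-- ===== LEMMAS AND PROOFS =====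

-- a fold adding a constant w on a boolean test equals init plus the sum of 0/w terms
theorem pv_foldl_if_add (l : List String) (p : String → Bool) (w a : Int) :
    l.foldl (fun s k => if p k then s + w else s) a
      = a + (l.map (fun k => if p k then w else 0)).sum := by
  induction l generalizing a with
  | nil => simp
  | cons x xs ih =>
    simp only [List.foldl_cons, List.map_cons, List.sum_cons, ih]
    by_cases h : p x <;> simp [h] <;> ring

-- if k does not occur among the first components, the selective sum is 0
theorem pv_sum_if_fst_not_mem (Wl : List (String × Int)) (k : String)
    (h : k ∉ Wl.map Prod.fst) :
    (Wl.map (fun q => if q.1 = k then q.2 else 0)).sum = 0 := by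
  induction Wl with
  | nil => simp
  | cons q rest ih =>
    simp only [List.map_cons, List.mem_cons, not_or] at h
    have hq : q.1 ≠ k := fun e => h.1 e.symm
    simp [hq, ih h.2]

-- on a dict with distinct keys, the selective sum over the items is getD
theorem pv_sum_if_fst_eq_getD (Wl : List (String × Int)) (k : String)
    (hnd : (Wl.map Prod.fst).Nodup) :
    (Wl.map (fun q => if q.1 = k then q.2 else 0)).sum
      = (PySem.Dict.mk Wl).getD k 0 := by
  induction Wl with
  | nil => simp [PySem.Dict.getD, PySem.Dict.get?]
  | cons q rest ih =>
    obtain ⟨k0, v0⟩ := q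
    simp only [List.map_cons, List.nodup_cons] at hnd
    rw [PySem.Dict.getD_eq_get?_getD, PySem.Dict.get?_mk_cons]
    by_cases h : k0 = k
    · subst h
      simp [pv_sum_if_fst_not_mem rest k0 hnd.1]
    · have : (k0 == k) = false := by simp [h]
      simp only [List.map_cons, List.sum_cons, this, if_neg h, Bool.false_eq_true, if_false]
      rw [← PySem.Dict.getD_eq_get?_getD, ← ih hnd.2]
      simp

-- summing getD over a Nodup key list equals the sum over the table of the members' weights
theorem pv_sum_getD (Wl : List (String × Int)) (hW : (Wl.map Prod.fst).Nodup)
    (K : List String) (hK : K.Nodup) :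
    (K.map (fun k => (PySem.Dict.mk Wl).getD k 0)).sum
      = (Wl.map (fun q => if q.1 ∈ K then q.2 else 0)).sum := by
  induction K with
  | nil => simp
  | cons k K' ih =>
    simp only [List.nodup_cons] at hK
    have hpt : (Wl.map (fun q => if q.1 ∈ k :: K' then q.2 else 0))
        = Wl.map (fun q => (if q.1 = k then q.2 else 0) + (if q.1 ∈ K' then q.2 else 0)) := by
      apply List.map_congr_left
      intro q _
      by_cases h1 : q.1 = k
      · rw [h1]; simp [hK.1]
      · by_cases h2 : q.1 ∈ K' <;> simp [h1, h2]
    rw [List.map_cons, List.sum_cons, hpt, PySem.List.sum_map_add_int,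
        pv_sum_if_fst_eq_getD Wl k hW, ih hK.2]

-- the weight table is the two fixed key tuples with their constant weights
theorem pv_weights_split :
    pvWeights = PySem.Dict.mk (pvKeys10.map (fun k => (k, (10 : Int)))
      ++ pvKeys4.map (fun k => (k, (4 : Int)))) := by
  decide

theorem pv_weights_nodup :
    (((pvKeys10.map (fun k => (k, (10 : Int)))
      ++ pvKeys4.map (fun k => (k, (4 : Int)))).map Prod.fst)).Nodup := by
  decide

-- ===== VERDICT (by name: the statement is the Claim_ definition above) =====
theorem task_candidate_score_py_spec : Claim_equal_task_candidate_score_py := by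
  intro candidate path _
  unfold Spec_task_candidate_score_py task_candidate_score_py task_candidate_score_py_alt
  set keys := candidate.map Prod.fst with hkeys
  simp only []
  rw [pv_foldl_if_add, pv_foldl_if_add, pv_weights_split,
      pv_sum_getD _ pv_weights_nodup _ (PySem.Set.nodup_ofList keys)]
  rw [List.map_append, List.sum_append, List.map_map, List.map_map]
  have h10 : (pvKeys10.map ((fun q : String × Int => if q.1 ∈ PySem.Set.ofList keys then q.2 else 0)
        ∘ (fun k => (k, (10 : Int))))) = pvKeys10.map (fun k => if keys.contains k then (10 : Int) else 0) := by
    apply List.map_congr_left; intro k _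
    simp only [Function.comp]
    by_cases h : k ∈ keys <;> simp [PySem.Set.mem_ofList, h]
  have h4 : (pvKeys4.map ((fun q : String × Int => if q.1 ∈ PySem.Set.ofList keys then q.2 else 0)
        ∘ (fun k => (k, (4 : Int))))) = pvKeys4.map (fun k => if keys.contains k then (4 : Int) else 0) := by
    apply List.map_congr_left; intro k _
    simp only [Function.comp]
    by_cases h : k ∈ keys <;> simp [PySem.Set.mem_ofList, h]
  rw [h10, h4]
  split_ifs <;> ring
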